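-- pv_equiv track=rewrite | github.com/Fan-Ding/CS5421 | answers.py | all_closures
-- ===== SOURCE A (Python) =====
-- def closure(R, F, S):
--     R = R.copy()
--     F = F.copy()
--     S = S.copy()
--
--     attributes_closure = S
--     closure_change_flag = True
--
--     while (closure_change_flag):
--         closure_change_flag = False
--         for fd in F:
--             if include_attributes(attributes_closure, fd[0]):
--                 for attribue in fd[1]:
--                     if attributes_closure.count(attribue) == 0:
--                         attributes_closure.append(attribue)
--                 F.remove(fd)
--                 closure_change_flag = True
--                 break
--
--     if len(attributes_closure) > 1:
--         attributes_closure.sort()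
--     return attributes_closure
--
-- def all_closures(R, F):
--     R = R.copy()
--     F = F.copy()
--     candidate_keys = []
--     all_closures_sets = []
--
--     # all possible subset of attributes; the result return by all_possible_subsets(r) has been sorted as [['A'],['B'],['C'],['A','B'],['A','C'],['B','C'].....]
--     all_subsets = all_possible_subsets(R)
--
--     # iterate all possible subset of attributes
--     for set in all_subsets:
--         # when a set of attribute is super key but not candidate keys, set "is_super_not_candidate" to True
--         is_super_not_candidate = False;
--         for candidate in candidate_keys:
--             if include_attributes(set, candidate):
--                 is_super_not_candidate = True
--                 break
--
--         if is_super_not_candidate: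
--             continue
--         else:
--             temp_closure = closure(R, F, set)
--             all_closures_sets.append([set, temp_closure])
--
--             # Judge whether it is candidate key
--             if len(temp_closure) == len(R):
--                 candidate_keys.append(set)
--     return all_closures_sets
--
-- def include_attributes(X, Y):
--     include_flag = True
--     for attribute_y in Y:
--         if X.count(attribute_y) == 0:
--             include_flag = False;
--             return include_flag;
--     return include_flag;
--
-- def all_possible_subsets(X):
--     all_subsets = []
--     # set X length
--     X_length = len(X);
--     for i in range(2 ** X_length):
--         temp_set = [];
--         for j in range(X_length):
--             if ((i >> j) % 2 == 1):
--                 temp_set.append(X[j])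
--         if (len(temp_set) != 0):
--             all_subsets.append(temp_set)
--     all_subsets = sorted(all_subsets, key=lambda i: str(len(i)) + i[0])
--     return all_subsets
-- ===== SOURCE B (Python) =====
-- # B: precompiled integer-bitmask FDs with a fixpoint closure per subset, recursive
-- # powerset generation, and a two-phase output (closures of every subset first, then
-- # superkey pruning against all earlier full-closure subsets) instead of A's
-- # interleaved candidate-key pruning with quadratic rescan-and-remove list closures.
-- def all_closures(R, F):
--     idx = {}
--     for a in R:
--         if a not in idx:
--             idx[a] = len(idx)
--     for fd in F:
--         for a in fd[0]:
--             if a not in idx: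
--                 idx[a] = len(idx)
--         for a in fd[1]:
--             if a not in idx:
--                 idx[a] = len(idx)
--     names = list(idx)
--     fds = [(_mask(idx, fd[0]), _mask(idx, fd[1])) for fd in F]
--     subsets = [s for s in _powerset(R) if s]
--     subsets.sort(key=lambda s: str(len(s)) + s[0])
--     rows = []
--     for s in subsets:
--         smask = _mask(idx, s)
--         cl = _close(fds, smask)
--         closed = sorted(s + [a for a in names if (cl >> idx[a]) & 1 == 1 and a not in s])
--         rows.append((smask, s, closed))
--     out = []
--     fulls = []
--     for smask, s, closed in rows:
--         if not any(f & smask == f for f in fulls):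
--             out.append([s, closed])
--         if len(closed) == len(R):
--             fulls.append(smask)
--     return out
--
-- def _mask(idx, attrs):
--     m = 0
--     for a in attrs:
--         m |= 1 << idx[a]
--     return m
--
-- def _close(fds, m):
--     while True:
--         new = m
--         for lhs, rhs in fds:
--             if lhs & new == lhs:
--                 new |= rhs
--         if new == m:
--             return m
--         m = new
--
-- def _powerset(xs):
--     if not xs:
--         return [[]]
--     rest = _powerset(xs[1:])
--     out = []
--     for s in rest:
--         out.append(s)
--         out.append([xs[0]] + s)
--     return out
-- ===== Notes on version B (the rewrite author's own statement) =====
-- stated objective: alternative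
-- what changed: B compiles the attributes into an integer bit index and the FDs into (lhs,rhs) bitmask pairs, computes each closure as a bitwise fixpoint on masks, generates subsets by a recursive powerset instead of A's bitcount loop, and replaces A's interleaved candidate-key pruning by a two-phase pass: closures are computed for every subset first, then a row is pruned when any earlier subset with full-length closure is a sub-mask of it (every full-closure subset is recorded, not only A's minimal candidate keys).
-- outside the precondition, e.g. on all_closures(['A'], [[['Z']]]): A returns [[['A'], ['A']]], B raises IndexError; on all_closures([], [[['Z']]]): A returns [], B raises IndexError
import Mathlib
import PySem

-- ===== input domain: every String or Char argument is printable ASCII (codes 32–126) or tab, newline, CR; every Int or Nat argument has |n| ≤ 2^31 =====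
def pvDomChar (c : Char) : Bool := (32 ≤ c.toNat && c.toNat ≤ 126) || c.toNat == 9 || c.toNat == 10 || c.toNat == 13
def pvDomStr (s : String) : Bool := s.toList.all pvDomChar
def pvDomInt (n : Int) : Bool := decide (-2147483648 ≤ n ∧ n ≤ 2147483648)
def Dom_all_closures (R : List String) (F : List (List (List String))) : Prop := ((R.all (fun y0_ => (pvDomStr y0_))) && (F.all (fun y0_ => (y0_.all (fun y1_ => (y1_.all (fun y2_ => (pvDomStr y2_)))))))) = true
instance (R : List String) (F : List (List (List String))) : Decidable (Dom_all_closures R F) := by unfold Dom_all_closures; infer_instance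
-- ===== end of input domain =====

-- B compiles the attributes into an integer bit index and the FDs into bitmask pairs,
-- computes closures as bitwise fixpoints, enumerates subsets by a recursive powerset,
-- and prunes superkeys in a second phase against all earlier full-closure subsets,
-- instead of A's rescan-and-remove list closures with interleaved candidate-key pruning.

-- ===== PORT A =====
-- include_attributes(X, Y): for-loop with early return False
def pvIncludeAttrs (X Y : List String) : Bool :=
  match Y with
  | [] => true
  | y :: ys => if X.count y == 0 then false else pvIncludeAttrs X ys

-- the scan 'for fd in F: if include_attributes(closure, fd[0]): … break' — first firing fd.
-- fd[0] ported as fd.getD 0 []: exact whenever fd ≠ [] (guaranteed by Pre_).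
def pvFindFire (ac : List String) : List (List (List String)) → Option (List (List String))
  | [] => none
  | fd :: rest => if pvIncludeAttrs ac (fd.getD 0 []) then some fd else pvFindFire ac rest

theorem pvFindFire_mem {ac : List String} {F : List (List (List String))}
    {fd : List (List String)} (h : pvFindFire ac F = some fd) : fd ∈ F := by
  induction F with
  | nil => simp [pvFindFire] at h
  | cons g rest ih =>
    rw [pvFindFire] at h
    split at h
    · cases h; exact List.mem_cons_self
    · exact List.mem_cons_of_mem _ (ih h)

-- 'for attribue in fd[1]: if closure.count(attribue) == 0: closure.append(attribue)'
def pvAddNew (ac ys : List String) : List String :=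
  ys.foldl (fun a y => if a.count y == 0 then a ++ [y] else a) ac

-- the while-loop of closure(): fire the first applicable fd, remove it from F, restart.
-- fd[1] ported as fd.getD 1 []: exact, Pre_ guarantees every fd has ≥ 2 components.
def pvClosLoop (F : List (List (List String))) (ac : List String) : List String :=
  match h : pvFindFire ac F with
  | none => ac
  | some fd => pvClosLoop (F.erase fd) (pvAddNew ac (fd.getD 1 []))
  termination_by F.length
  decreasing_by
    have hm := pvFindFire_mem h
    have := List.length_erase_of_mem hm
    have : 0 < F.length := List.length_pos_of_mem hm
    omega

def pvClosure (R : List String) (F : List (List (List String))) (S : List String) : List String :=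
  let ac := pvClosLoop F S
  if 1 < ac.length then PySem.List.sorted ac (fun x => x) false else ac

-- temp_set of all_possible_subsets for mask i
def pvSubsetOf (X : List String) (i : Int) : List String :=
  (PySem.List.pyRange 0 (X.length) 1).foldl
    (fun t j => if PySem.Int.mod (i >>> j.toNat) 2 == 1 then t ++ [PySem.List.pyGetD X j ""] else t) []
    -- j ranges over 0..len-1, so j ≥ 0 and j.toNat is Python's shift count exactly

def pvAllSubsets (X : List String) : List (List String) :=
  let subs := (PySem.List.pyRange 0 (2 ^ X.length) 1).foldl
    (fun acc i => let t := pvSubsetOf X i; if t.length ≠ 0 then acc ++ [t] else acc) []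
  PySem.List.sorted subs (fun s => PySem.Int.toStr (s.length) ++ PySem.List.pyGetD s 0 "") false

def all_closures (R : List String) (F : List (List (List String))) : List (List (List String)) :=
  ((pvAllSubsets R).foldl
    (fun (st : List (List String) × List (List (List String))) s =>
      if st.1.any (fun c => pvIncludeAttrs s c) then st
      else
        let tc := pvClosure R F s
        let acc := st.2 ++ [[s, tc]]
        if tc.length == R.length then (st.1 ++ [s], acc) else (st.1, acc))
    ([], [])).2

-- ===== PORT B =====
-- idx = insertion-ordered dict attribute -> bit position; ported as its key list `names`
-- (idx[a] = names.idxOf a, exact since every key looked up was inserted).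
def pvNames (R : List String) (F : List (List (List String))) : List String :=
  F.foldl (fun acc fd => PySem.Set.update (PySem.Set.update acc (fd.getD 0 [])) (fd.getD 1 []))
    (PySem.Set.ofList R)

-- _mask(idx, attrs); masks are nonnegative Python ints, represented as Nat (bit-exact here)
def pvMask (names : List String) (attrs : List String) : Nat :=
  attrs.foldl (fun m a => m ||| (1 <<< names.idxOf a)) 0

-- fds = [(_mask(idx, fd[0]), _mask(idx, fd[1])) for fd in F]
def pvFds (names : List String) (F : List (List (List String))) : List (Nat × Nat) :=
  F.map (fun fd => (pvMask names (fd.getD 0 []), pvMask names (fd.getD 1 [])))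

-- one round of _close: for lhs, rhs in fds: if lhs & new == lhs: new |= rhs
def pvStep (fds : List (Nat × Nat)) (m : Nat) : Nat :=
  fds.foldl (fun acc p => if p.1 &&& acc == p.1 then acc ||| p.2 else acc) m

-- union of all rhs masks (only used in pvClose's termination measure)
def pvTotR (fds : List (Nat × Nat)) : Nat := fds.foldl (fun a p => a ||| p.2) 0

theorem pvStep_le (fds : List (Nat × Nat)) (m : Nat) : m ≤ pvStep fds m := by
  unfold pvStep
  induction fds generalizing m with
  | nil => exact le_rfl
  | cons p t ih =>
    rw [List.foldl_cons]
    refine le_trans ?_ (ih _)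
    by_cases h : (p.1 &&& m == p.1) = true
    · rw [if_pos h]; exact Nat.left_le_or
    · rw [if_neg h]

theorem testBit_pvStep_mono (fds : List (Nat × Nat)) (m : Nat) (k : Nat)
    (h : m.testBit k = true) : (pvStep fds m).testBit k = true := by
  unfold pvStep
  induction fds generalizing m with
  | nil => exact h
  | cons p t ih =>
    rw [List.foldl_cons]
    apply ih
    by_cases hc : (p.1 &&& m == p.1) = true
    · rw [if_pos hc, Nat.testBit_or, h, Bool.true_or]
    · rwa [if_neg hc]

theorem testBit_pvStep_bound (fds : List (Nat × Nat)) (m : Nat) (k : Nat)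
    (h : (pvStep fds m).testBit k = true) :
    m.testBit k = true ∨ ∃ p ∈ fds, p.2.testBit k = true := by
  unfold pvStep at h
  induction fds generalizing m with
  | nil => exact Or.inl h
  | cons p t ih =>
    rw [List.foldl_cons] at h
    rcases ih _ h with h1 | ⟨q, hq, hb⟩
    · by_cases hc : (p.1 &&& m == p.1) = true
      · rw [if_pos hc, Nat.testBit_or] at h1
        rcases Bool.or_eq_true_iff.mp h1 with h2 | h2
        · exact Or.inl h2
        · exact Or.inr ⟨p, List.mem_cons_self, h2⟩
      · rw [if_neg hc] at h1; exact Or.inl h1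
    · exact Or.inr ⟨q, List.mem_cons_of_mem _ hq, hb⟩

theorem testBit_foldl_or (l : List (Nat × Nat)) (acc k : Nat) :
    ((l.foldl (fun a p => a ||| p.2) acc).testBit k = true) ↔
      (acc.testBit k = true ∨ ∃ p ∈ l, p.2.testBit k = true) := by
  induction l generalizing acc with
  | nil => simp
  | cons p t ih =>
    rw [List.foldl_cons, ih, Nat.testBit_or]
    simp only [Bool.or_eq_true, List.mem_cons]
    constructor
    · rintro ((h | h) | ⟨q, hq, hb⟩)
      · exact Or.inl h
      · exact Or.inr ⟨p, Or.inl rfl, h⟩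
      · exact Or.inr ⟨q, Or.inr hq, hb⟩
    · rintro (h | ⟨q, (rfl | hq), hb⟩)
      · exact Or.inl (Or.inl h)
      · exact Or.inl (Or.inr hb)
      · exact Or.inr ⟨q, hq, hb⟩

theorem testBit_pvTotR (fds : List (Nat × Nat)) (k : Nat) :
    ((pvTotR fds).testBit k = true) ↔ ∃ p ∈ fds, p.2.testBit k = true := by
  unfold pvTotR; rw [testBit_foldl_or]; simp

theorem pvTotR_or_pvStep (fds : List (Nat × Nat)) (m : Nat) :
    pvTotR fds ||| pvStep fds m = pvTotR fds ||| m := by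
  apply Nat.eq_of_testBit_eq
  intro k
  rw [Nat.testBit_or, Nat.testBit_or, Bool.eq_iff_iff]
  simp only [Bool.or_eq_true]
  constructor
  · rintro (h | h)
    · exact Or.inl h
    · rcases testBit_pvStep_bound fds m k h with h' | ⟨p, hp, hb⟩
      · exact Or.inr h'
      · exact Or.inl ((testBit_pvTotR fds k).mpr ⟨p, hp, hb⟩)
  · rintro (h | h)
    · exact Or.inl h
    · exact Or.inr (testBit_pvStep_mono fds m k h)

theorem pvClose_measure (fds : List (Nat × Nat)) (m : Nat) (h : pvStep fds m ≠ m) :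
    (pvTotR fds ||| pvStep fds m) - pvStep fds m < (pvTotR fds ||| m) - m := by
  have h1 := pvStep_le fds m
  have h2 := pvTotR_or_pvStep fds m
  have h3 : pvStep fds m ≤ pvTotR fds ||| pvStep fds m := by
    rw [Nat.lor_comm]; exact Nat.left_le_or
  rw [h2] at h3 ⊢
  omega

-- _close's while-loop: repeat the round until nothing changes
def pvClose (fds : List (Nat × Nat)) (m : Nat) : Nat :=
  let new := pvStep fds m
  if _h : new = m then m else pvClose fds new
  termination_by (pvTotR fds ||| m) - m
  decreasing_by exact pvClose_measure fds m _h

-- _powerset(xs): recursive subset generation, each subset twice: without/with xs[0]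
def pvPowerset : List String → List (List String)
  | [] => [[]]
  | x :: t => (pvPowerset t).foldl (fun out s => out ++ [s, x :: s]) []

-- subsets = [s for s in _powerset(R) if s]; subsets.sort(key=lambda s: str(len(s)) + s[0])
def pvSubsetsB (R : List String) : List (List String) :=
  PySem.List.sorted ((pvPowerset R).filter (fun s => !s.isEmpty))
    (fun s => PySem.Int.toStr (s.length) ++ PySem.List.pyGetD s 0 "") false

def all_closures_alt (R : List String) (F : List (List (List String))) : List (List (List String)) :=
  let names := pvNames R F
  let fds := pvFds names F
  let subsets := pvSubsetsB R
  let rows := subsets.foldl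
    (fun rows s =>
      let smask := pvMask names s
      let cl := pvClose fds smask
      let closed := PySem.List.sorted
        (s ++ names.filter (fun a => ((cl >>> names.idxOf a) &&& 1 == 1) && !(s.contains a)))
        (fun x => x) false
      rows ++ [(smask, s, closed)]) []
  (rows.foldl
    (fun (st : List Nat × List (List (List String))) r =>
      ((if r.2.2.length == R.length then st.1 ++ [r.1] else st.1),
       (if !(st.1.any (fun f => f &&& r.1 == f)) then st.2 ++ [[r.2.1, r.2.2]] else st.2)))
    ([], [])).2

-- ===== PRECONDITION & SPEC =====
-- Pre_ excludes inputs containing a malformed FD with fewer than two component lists: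
-- on those A raises IndexError as soon as such an FD is scanned (fd[0]) or fired (fd[1]),
-- and only returns accidentally when the FD never fires or R is empty so F is never read,
-- while B's eager FD-to-bitmask compilation reads fd[0] and fd[1] of every FD and raises.
def Pre_all_closures (R : List String) (F : List (List (List String))) : Prop :=
  ∀ fd ∈ F, 2 ≤ fd.length
instance (R : List String) (F : List (List (List String))) : Decidable (Pre_all_closures R F) := by
  unfold Pre_all_closures; infer_instance

def pvWitness_all_closures : List String × List (List (List String)) :=
  (["A", "B"], [[["A"], ["B"]]])

def Spec_all_closures (R : List String) (F : List (List (List String))) (out : List (List (List String))) : Prop := out = all_closures_alt R F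
instance (R : List String) (F : List (List (List String))) (out : List (List (List String))) : Decidable (Spec_all_closures R F out) := by unfold Spec_all_closures; infer_instance

-- ===== CLAIM (what is proved, stated in full; the proofs are below) =====
def Claim_equal_all_closures : Prop := ∀ (R : List String) (F : List (List (List String))), Dom_all_closures R F → Pre_all_closures R F → Spec_all_closures R F (all_closures R F)

-- ===== LEMMAS AND PROOFS =====

theorem pvIncludeAttrs_iff (X Y : List String) : pvIncludeAttrs X Y = true ↔ ∀ y ∈ Y, y ∈ X := by
  induction Y with
  | nil => simp [pvIncludeAttrs]
  | cons y ys ih =>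
    rw [pvIncludeAttrs]
    rcases Nat.eq_zero_or_pos (X.count y) with hc | hc
    · have hy : y ∉ X := List.count_eq_zero.mp hc
      simp [hc, hy]
    · have hy : y ∈ X := List.count_pos_iff.mp hc
      have hne : (X.count y == 0) = false := by simp; omega
      simp [hne, ih, hy]

theorem mem_pvAddNew (a : String) (ac ys : List String) :
    a ∈ pvAddNew ac ys ↔ a ∈ ac ∨ a ∈ ys := by
  induction ys generalizing ac with
  | nil => simp [pvAddNew]
  | cons y ys ih =>
    rw [pvAddNew, List.foldl_cons]
    rcases Nat.eq_zero_or_pos (ac.count y) with hc | hc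
    · have hy : y ∉ ac := List.count_eq_zero.mp hc
      have hb : (ac.count y == 0) = true := by simp [hc]
      rw [if_pos hb]
      show a ∈ pvAddNew (ac ++ [y]) ys ↔ _
      rw [ih]
      simp [List.mem_append]
      tauto
    · have hne : ¬ ((ac.count y == 0) = true) := by simp; omega
      have hy : y ∈ ac := List.count_pos_iff.mp hc
      rw [if_neg hne]
      show a ∈ pvAddNew ac ys ↔ _
      rw [ih]
      simp only [List.mem_cons]
      constructor
      · tauto
      · rintro (h | rfl | h)
        · tauto
        · exact Or.inl hy
        · tauto

theorem pvAddNew_spec (ac ys : List String) :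
    ∃ L, pvAddNew ac ys = ac ++ L ∧ L.Nodup ∧ ∀ a ∈ L, a ∉ ac := by
  induction ys generalizing ac with
  | nil => exact ⟨[], by simp [pvAddNew]⟩
  | cons y ys ih =>
    rw [pvAddNew, List.foldl_cons]
    rcases Nat.eq_zero_or_pos (ac.count y) with hc | hc
    · have hy : y ∉ ac := List.count_eq_zero.mp hc
      have hb : (ac.count y == 0) = true := by simp [hc]
      rw [if_pos hb]
      rcases ih (ac ++ [y]) with ⟨L, hL, hn, hd⟩
      refine ⟨y :: L, ?_, ?_, ?_⟩
      · show pvAddNew (ac ++ [y]) ys = ac ++ y :: L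
        rw [hL, List.append_assoc]; rfl
      · exact List.nodup_cons.mpr ⟨fun h => hd y h (by simp), hn⟩
      · intro a ha
        rcases List.mem_cons.mp ha with rfl | h
        · exact hy
        · exact fun hac => hd a h (by simp [hac])
    · have hne : ¬ ((ac.count y == 0) = true) := by simp; omega
      rw [if_neg hne]
      exact ih ac

theorem pvFindFire_none {ac : List String} {F : List (List (List String))}
    (h : pvFindFire ac F = none) :
    ∀ fd ∈ F, pvIncludeAttrs ac (fd.getD 0 []) = false := by
  induction F with
  | nil => simp
  | cons g rest ih =>
    rw [pvFindFire] at h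
    split at h
    · cases h
    · rename_i hg
      intro fd hfd
      rcases List.mem_cons.mp hfd with rfl | hm
      · exact Bool.eq_false_iff.mpr hg
      · exact ih h fd hm

theorem pvFindFire_fires {ac : List String} {F : List (List (List String))}
    {fd : List (List String)} (h : pvFindFire ac F = some fd) :
    pvIncludeAttrs ac (fd.getD 0 []) = true := by
  induction F with
  | nil => simp [pvFindFire] at h
  | cons g rest ih =>
    rw [pvFindFire] at h
    split at h
    · cases h; assumption
    · exact ih h

theorem pvClosLoop_none {F : List (List (List String))} {ac : List String}
    (h : pvFindFire ac F = none) : pvClosLoop F ac = ac := by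
  rw [pvClosLoop]
  split
  · rfl
  · rename_i fd hsome; rw [h] at hsome; cases hsome

theorem pvClosLoop_some {F : List (List (List String))} {ac : List String}
    {fd : List (List String)} (h : pvFindFire ac F = some fd) :
    pvClosLoop F ac = pvClosLoop (F.erase fd) (pvAddNew ac (fd.getD 1 [])) := by
  rw [pvClosLoop]
  split
  · rename_i hnone; rw [h] at hnone; cases hnone
  · rename_i fd' hsome; rw [h] at hsome; cases hsome; rfl

theorem mem_pvClosLoop (a : String) (F : List (List (List String))) (ac : List String) :
    a ∈ ac → a ∈ pvClosLoop F ac := by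
  induction F, ac using pvClosLoop.induct with
  | case1 F ac hnone => intro h; rwa [pvClosLoop_none hnone]
  | case2 F ac fd hsome ih =>
    intro h
    rw [pvClosLoop_some hsome]
    exact ih ((mem_pvAddNew a ac _).mpr (Or.inl h))

theorem pvClosLoop_spec (F : List (List (List String))) (ac : List String) :
    ∃ L, pvClosLoop F ac = ac ++ L ∧ L.Nodup ∧ ∀ a ∈ L, a ∉ ac := by
  induction F, ac using pvClosLoop.induct with
  | case1 F ac hnone => exact ⟨[], by simp [pvClosLoop_none hnone]⟩
  | case2 F ac fd hsome ih =>
    rcases pvAddNew_spec ac (fd.getD 1 []) with ⟨L1, h1, hn1, hd1⟩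
    rcases ih with ⟨L2, h2, hn2, hd2⟩
    rw [h1] at hd2
    refine ⟨L1 ++ L2, ?_, ?_, ?_⟩
    · rw [pvClosLoop_some hsome, h2, h1, List.append_assoc]
    · exact List.Nodup.append hn1 hn2 (fun a ha1 ha2 => hd2 a ha2 (by simp [ha1]))
    · intro a ha
      rcases List.mem_append.mp ha with h | h
      · exact hd1 a h
      · exact fun hac => hd2 a h (by simp [hac])

theorem pvClosLoop_closed (F : List (List (List String))) (ac : List String) :
    ∀ fd ∈ F, (∀ y ∈ fd.getD 0 [], y ∈ pvClosLoop F ac) →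
      ∀ y ∈ fd.getD 1 [], y ∈ pvClosLoop F ac := by
  induction F, ac using pvClosLoop.induct with
  | case1 F ac hnone =>
    intro fd hfd hlhs y hy
    exfalso
    have hfalse := pvFindFire_none hnone fd hfd
    rw [pvClosLoop_none hnone] at hlhs
    rw [(pvIncludeAttrs_iff ac (fd.getD 0 [])).mpr hlhs] at hfalse
    cases hfalse
  | case2 F ac fd hsome ih =>
    intro fd' hfd' hlhs y hy
    rw [pvClosLoop_some hsome] at hlhs ⊢
    by_cases he : fd' = fd
    · subst he
      exact mem_pvClosLoop y _ _ ((mem_pvAddNew y ac _).mpr (Or.inr hy))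
    · exact ih fd' ((List.mem_erase_of_ne he).mpr hfd') hlhs y hy

theorem pvClosLoop_min (T : String → Prop) (F : List (List (List String))) (ac : List String) :
    (∀ a ∈ ac, T a) →
    (∀ fd ∈ F, (∀ y ∈ fd.getD 0 [], T y) → ∀ y ∈ fd.getD 1 [], T y) →
    ∀ a ∈ pvClosLoop F ac, T a := by
  induction F, ac using pvClosLoop.induct with
  | case1 F ac hnone =>
    intro hac _ a ha
    rw [pvClosLoop_none hnone] at ha
    exact hac a ha
  | case2 F ac fd hsome ih =>
    intro hac hcl a ha
    rw [pvClosLoop_some hsome] at ha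
    have hrhs : ∀ y ∈ fd.getD 1 [], T y :=
      hcl fd (pvFindFire_mem hsome)
        (fun y hy => hac y ((pvIncludeAttrs_iff ac _).mp (pvFindFire_fires hsome) y hy))
    refine ih ?_ ?_ a ha
    · intro b hb
      rcases (mem_pvAddNew b ac _).mp hb with h | h
      · exact hac b h
      · exact hrhs b h
    · intro fd' hfd'
      exact hcl fd' (List.erase_subset hfd')

-- ===== B-side lemmas: names, masks, fixpoint closure =====

theorem mem_pvNames_aux (a : String) (F : List (List (List String))) :
    ∀ (acc : PySem.Set String),
      a ∈ F.foldl (fun acc fd => PySem.Set.update (PySem.Set.update acc (fd.getD 0 [])) (fd.getD 1 [])) acc ↔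
        a ∈ acc ∨ ∃ fd ∈ F, a ∈ fd.getD 0 [] ∨ a ∈ fd.getD 1 [] := by
  induction F with
  | nil => simp
  | cons fd t ih =>
    intro acc
    rw [List.foldl_cons, ih]
    simp only [PySem.Set.mem_update, List.mem_cons]
    constructor
    · rintro (((h | h) | h) | ⟨g, hg, hm⟩)
      · exact Or.inl h
      · exact Or.inr ⟨fd, Or.inl rfl, Or.inl h⟩
      · exact Or.inr ⟨fd, Or.inl rfl, Or.inr h⟩
      · exact Or.inr ⟨g, Or.inr hg, hm⟩
    · rintro (h | ⟨g, (rfl | hg), hm⟩)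
      · exact Or.inl (Or.inl (Or.inl h))
      · rcases hm with h | h
        · exact Or.inl (Or.inl (Or.inr h))
        · exact Or.inl (Or.inr h)
      · exact Or.inr ⟨g, hg, hm⟩

theorem mem_pvNames (R : List String) (F : List (List (List String))) (a : String) :
    a ∈ pvNames R F ↔ a ∈ R ∨ ∃ fd ∈ F, a ∈ fd.getD 0 [] ∨ a ∈ fd.getD 1 [] := by
  unfold pvNames
  rw [mem_pvNames_aux]
  simp [PySem.Set.mem_ofList]

theorem nodup_pvNames (R : List String) (F : List (List (List String))) :
    (pvNames R F).Nodup := by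
  unfold pvNames
  have h : ∀ (G : List (List (List String))) (acc : PySem.Set String), acc.Nodup →
      (G.foldl (fun acc fd => PySem.Set.update (PySem.Set.update acc (fd.getD 0 [])) (fd.getD 1 [])) acc).Nodup := by
    intro G
    induction G with
    | nil => exact fun acc h => h
    | cons fd t ih =>
      intro acc hacc
      exact ih _ (PySem.Set.nodup_update _ _ (PySem.Set.nodup_update _ _ hacc))
  exact h F _ (PySem.Set.nodup_ofList R)

theorem idxOf_inj_mem {l : List String} {a b : String} (ha : a ∈ l) (hb : b ∈ l)
    (h : l.idxOf a = l.idxOf b) : a = b := by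
  have h1 := List.getElem_idxOf (List.idxOf_lt_length_of_mem ha)
  have h2 := List.getElem_idxOf (List.idxOf_lt_length_of_mem hb)
  rw [← h1, ← h2]
  exact getElem_congr rfl h (List.idxOf_lt_length_of_mem ha)

theorem testBit_mask_foldl (names : List String) (l : List String) :
    ∀ (m0 k : Nat),
      ((l.foldl (fun m a => m ||| (1 <<< names.idxOf a)) m0).testBit k = true) ↔
        (m0.testBit k = true ∨ ∃ a ∈ l, names.idxOf a = k) := by
  induction l with
  | nil => simp
  | cons x t ih =>
    intro m0 k
    rw [List.foldl_cons, ih]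
    rw [Nat.testBit_or, Nat.one_shiftLeft, Nat.testBit_two_pow]
    simp only [Bool.or_eq_true, decide_eq_true_eq, List.mem_cons]
    constructor
    · rintro ((h | h) | ⟨a, ha, hk⟩)
      · exact Or.inl h
      · exact Or.inr ⟨x, Or.inl rfl, h⟩
      · exact Or.inr ⟨a, Or.inr ha, hk⟩
    · rintro (h | ⟨a, (rfl | ha), hk⟩)
      · exact Or.inl (Or.inl h)
      · exact Or.inl (Or.inr hk)
      · exact Or.inr ⟨a, ha, hk⟩

theorem testBit_pvMask (names l : List String) (k : Nat) :
    ((pvMask names l).testBit k = true) ↔ ∃ a ∈ l, names.idxOf a = k := by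
  unfold pvMask
  rw [testBit_mask_foldl]
  simp

theorem submask_iff (x y : Nat) :
    ((x &&& y == x) = true) ↔ ∀ k, x.testBit k = true → y.testBit k = true := by
  constructor
  · intro h k hk
    have he : x &&& y = x := by simpa using h
    have := congrArg (fun z => z.testBit k) he
    simp only [Nat.testBit_and] at this
    rw [hk, Bool.true_and] at this
    exact this
  · intro h
    simp only [beq_iff_eq]
    apply Nat.eq_of_testBit_eq
    intro k
    rw [Nat.testBit_and]
    cases hx : x.testBit k
    · simp
    · simp [h k hx]

theorem submask_trans {x y z : Nat} (h1 : (x &&& y == x) = true) (h2 : (y &&& z == y) = true) :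
    (x &&& z == x) = true := by
  rw [submask_iff] at h1 h2 ⊢
  exact fun k hk => h2 k (h1 k hk)

theorem include_eq_submask (names s c : List String)
    (hs : ∀ a ∈ s, a ∈ names) (hc : ∀ a ∈ c, a ∈ names) :
    pvIncludeAttrs s c = (pvMask names c &&& pvMask names s == pvMask names c) := by
  rw [Bool.eq_iff_iff, pvIncludeAttrs_iff, submask_iff]
  constructor
  · intro h k hk
    rcases (testBit_pvMask names c k).mp hk with ⟨a, ha, rfl⟩
    exact (testBit_pvMask names s _).mpr ⟨a, h a ha, rfl⟩
  · intro h a ha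
    have hk := (testBit_pvMask names c _).mpr ⟨a, ha, rfl⟩
    rcases (testBit_pvMask names s _).mp (h _ hk) with ⟨b, hb, hidx⟩
    rwa [idxOf_inj_mem (hs b hb) (hc a ha) hidx] at hb

theorem pvClose_fix_eq {fds : List (Nat × Nat)} {m : Nat} (h : pvStep fds m = m) :
    pvClose fds m = m := by
  rw [pvClose]
  simp [h]

theorem pvClose_step_eq {fds : List (Nat × Nat)} {m : Nat} (h : pvStep fds m ≠ m) :
    pvClose fds m = pvClose fds (pvStep fds m) := by
  rw [pvClose]
  simp [h]

theorem pvStep_pvClose_aux (fds : List (Nat × Nat)) (n : Nat) :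
    ∀ m, (pvTotR fds ||| m) - m ≤ n → pvStep fds (pvClose fds m) = pvClose fds m := by
  induction n with
  | zero =>
    intro m hm
    by_cases h : pvStep fds m = m
    · rw [pvClose_fix_eq h]; exact h
    · exfalso; have := pvClose_measure fds m h; omega
  | succ n ih =>
    intro m hm
    by_cases h : pvStep fds m = m
    · rw [pvClose_fix_eq h]; exact h
    · rw [pvClose_step_eq h]
      exact ih (pvStep fds m) (by have h5 := pvClose_measure fds m h; omega)

theorem pvStep_pvClose (fds : List (Nat × Nat)) (m : Nat) :
    pvStep fds (pvClose fds m) = pvClose fds m :=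
  pvStep_pvClose_aux fds _ m le_rfl

theorem testBit_pvClose_mono_aux (fds : List (Nat × Nat)) (n : Nat) :
    ∀ m, (pvTotR fds ||| m) - m ≤ n →
      ∀ k, m.testBit k = true → (pvClose fds m).testBit k = true := by
  induction n with
  | zero =>
    intro m hm k hk
    by_cases h : pvStep fds m = m
    · rwa [pvClose_fix_eq h]
    · exfalso; have := pvClose_measure fds m h; omega
  | succ n ih =>
    intro m hm k hk
    by_cases h : pvStep fds m = m
    · rwa [pvClose_fix_eq h]
    · rw [pvClose_step_eq h]
      exact ih (pvStep fds m) (by have h5 := pvClose_measure fds m h; omega) k (testBit_pvStep_mono fds m k hk)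

theorem testBit_pvClose_mono (fds : List (Nat × Nat)) (m : Nat) :
    ∀ k, m.testBit k = true → (pvClose fds m).testBit k = true :=
  testBit_pvClose_mono_aux fds _ m le_rfl

theorem stepfun_le (a : Nat) (p : Nat × Nat) :
    a ≤ (if p.1 &&& a == p.1 then a ||| p.2 else a) := by
  by_cases h : (p.1 &&& a == p.1) = true
  · rw [if_pos h]; exact Nat.left_le_or
  · rw [if_neg h]

theorem foldl_step_ge (l : List (Nat × Nat)) :
    ∀ (r : Nat), r ≤ l.foldl (fun a p => if p.1 &&& a == p.1 then a ||| p.2 else a) r := by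
  induction l with
  | nil => exact fun r => le_rfl
  | cons q t ih =>
    intro r
    rw [List.foldl_cons]
    exact le_trans (stepfun_le r q) (ih _)

theorem foldl_step_fix_mem (l : List (Nat × Nat)) :
    ∀ (r : Nat), l.foldl (fun a p => if p.1 &&& a == p.1 then a ||| p.2 else a) r = r →
      ∀ p ∈ l, (if p.1 &&& r == p.1 then r ||| p.2 else r) = r := by
  induction l with
  | nil => intro r _ p hp; cases hp
  | cons q t ih =>
    intro r hfold p hp
    rw [List.foldl_cons] at hfold
    have h2 := foldl_step_ge t ((if q.1 &&& r == q.1 then r ||| q.2 else r))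
    rw [hfold] at h2
    have hq : (if q.1 &&& r == q.1 then r ||| q.2 else r) = r :=
      le_antisymm h2 (stepfun_le r q)
    rcases List.mem_cons.mp hp with rfl | hm
    · exact hq
    · rw [hq] at hfold
      exact ih r hfold p hm

theorem pvClose_closed (fds : List (Nat × Nat)) (m : Nat) (p : Nat × Nat) (hp : p ∈ fds)
    (hl : ∀ k, p.1.testBit k = true → (pvClose fds m).testBit k = true) :
    ∀ k, p.2.testBit k = true → (pvClose fds m).testBit k = true := by
  have hfix : pvStep fds (pvClose fds m) = pvClose fds m := pvStep_pvClose fds m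
  have hstep := foldl_step_fix_mem fds (pvClose fds m) hfix p hp
  have hcond : (p.1 &&& pvClose fds m == p.1) = true := (submask_iff _ _).mpr hl
  rw [if_pos hcond] at hstep
  intro k hk
  have := congrArg (fun z => z.testBit k) hstep
  simp only [Nat.testBit_or] at this
  rw [hk, Bool.or_true] at this
  exact this.symm

theorem pvStep_min (P : Nat → Prop) (fds : List (Nat × Nat)) :
    ∀ (l : List (Nat × Nat)) (acc : Nat),
      (∀ k, acc.testBit k = true → P k) →
      (∀ p ∈ l, (∀ k, p.1.testBit k = true → P k) → ∀ k, p.2.testBit k = true → P k) →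
      ∀ k, ((l.foldl (fun a p => if p.1 &&& a == p.1 then a ||| p.2 else a) acc).testBit k = true) → P k := by
  intro l
  induction l with
  | nil => intro acc hacc _ k hk; exact hacc k hk
  | cons q t ih =>
    intro acc hacc hcl k hk
    rw [List.foldl_cons] at hk
    refine ih _ ?_ (fun p hp => hcl p (List.mem_cons_of_mem _ hp)) k hk
    intro j hj
    by_cases hc : (q.1 &&& acc == q.1) = true
    · rw [if_pos hc, Nat.testBit_or] at hj
      rcases Bool.or_eq_true_iff.mp hj with h | h
      · exact hacc j h
      · exact hcl q List.mem_cons_self (fun i hi => hacc i ((submask_iff _ _).mp hc i hi)) j h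
    · rw [if_neg hc] at hj; exact hacc j hj

theorem pvClose_min (fds : List (Nat × Nat)) (m : Nat) (P : Nat → Prop) :
    (∀ p ∈ fds, (∀ k, p.1.testBit k = true → P k) → ∀ k, p.2.testBit k = true → P k) →
    (∀ k, m.testBit k = true → P k) →
    ∀ k, (pvClose fds m).testBit k = true → P k := by
  intro hcl
  have aux : ∀ (n : Nat), ∀ m, (pvTotR fds ||| m) - m ≤ n →
      (∀ k, m.testBit k = true → P k) →
      ∀ k, (pvClose fds m).testBit k = true → P k := by
    intro n
    induction n with
    | zero =>
      intro m hm hbase k hk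
      by_cases h : pvStep fds m = m
      · rw [pvClose_fix_eq h] at hk; exact hbase k hk
      · exfalso; have := pvClose_measure fds m h; omega
    | succ n ih =>
      intro m hm hbase k hk
      by_cases h : pvStep fds m = m
      · rw [pvClose_fix_eq h] at hk; exact hbase k hk
      · rw [pvClose_step_eq h] at hk
        exact ih (pvStep fds m) (by have h5 := pvClose_measure fds m h; omega)
          (pvStep_min P fds fds m hbase hcl) k hk
  exact aux _ m le_rfl

-- ===== the closure bridge: A's string closure list vs B's bitmask fixpoint =====

theorem closLoop_subset_names (R : List String) (F : List (List (List String)))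
    (s : List String) (hs : ∀ a ∈ s, a ∈ pvNames R F) :
    ∀ a ∈ pvClosLoop F s, a ∈ pvNames R F :=
  pvClosLoop_min (· ∈ pvNames R F) F s hs
    (fun fd hfd _ y hy => (mem_pvNames R F y).mpr (Or.inr ⟨fd, hfd, Or.inr hy⟩))

theorem closure_bridge (R : List String) (F : List (List (List String)))
    (s : List String) (hs : ∀ a ∈ s, a ∈ pvNames R F) (a : String) :
    a ∈ pvClosLoop F s ↔
      (a ∈ pvNames R F ∧
        (pvClose (pvFds (pvNames R F) F) (pvMask (pvNames R F) s)).testBit ((pvNames R F).idxOf a) = true) := by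
  constructor
  · intro h
    refine pvClosLoop_min
      (fun b => b ∈ pvNames R F ∧
        (pvClose (pvFds (pvNames R F) F) (pvMask (pvNames R F) s)).testBit ((pvNames R F).idxOf b) = true)
      F s ?_ ?_ a h
    · intro b hb
      exact ⟨hs b hb,
        testBit_pvClose_mono _ _ _ ((testBit_pvMask _ _ _).mpr ⟨b, hb, rfl⟩)⟩
    · intro fd hfd hT y hy
      have hpmem : (pvMask (pvNames R F) (fd.getD 0 []), pvMask (pvNames R F) (fd.getD 1 [])) ∈ pvFds (pvNames R F) F :=
        List.mem_map.mpr ⟨fd, hfd, rfl⟩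
      have hl : ∀ k, (pvMask (pvNames R F) (fd.getD 0 [])).testBit k = true →
          (pvClose (pvFds (pvNames R F) F) (pvMask (pvNames R F) s)).testBit k = true := by
        intro k hk
        rcases (testBit_pvMask _ _ _).mp hk with ⟨b, hb0, rfl⟩
        exact (hT b hb0).2
      refine ⟨(mem_pvNames R F y).mpr (Or.inr ⟨fd, hfd, Or.inr hy⟩), ?_⟩
      exact pvClose_closed _ _ _ hpmem hl _ ((testBit_pvMask _ _ _).mpr ⟨y, hy, rfl⟩)
  · rintro ⟨han, hbit⟩
    have hmin := pvClose_min (pvFds (pvNames R F) F) (pvMask (pvNames R F) s)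
      (fun k => ∃ b ∈ pvClosLoop F s, (pvNames R F).idxOf b = k) ?_ ?_ _ hbit
    · rcases hmin with ⟨b, hbcl, hidx⟩
      rwa [idxOf_inj_mem (closLoop_subset_names R F s hs b hbcl) han hidx] at hbcl
    · intro p hp hT k hk
      rcases List.mem_map.mp hp with ⟨fd, hfd, rfl⟩
      have hlhs : ∀ b ∈ fd.getD 0 [], b ∈ pvClosLoop F s := by
        intro b hb
        rcases hT _ ((testBit_pvMask _ _ _).mpr ⟨b, hb, rfl⟩) with ⟨c, hc, hidx⟩
        rwa [idxOf_inj_mem (closLoop_subset_names R F s hs c hc)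
          ((mem_pvNames R F b).mpr (Or.inr ⟨fd, hfd, Or.inl hb⟩)) hidx] at hc
      rcases (testBit_pvMask _ _ _).mp hk with ⟨y, hy, rfl⟩
      exact ⟨y, pvClosLoop_closed F s fd hfd hlhs y hy, rfl⟩
    · intro k hk
      rcases (testBit_pvMask _ _ _).mp hk with ⟨b, hb, rfl⟩
      exact ⟨b, mem_pvClosLoop b F s hb, rfl⟩

theorem bit_eq_testBit (x k : Nat) : ((x >>> k) &&& 1 == 1) = x.testBit k := by
  simp [Nat.testBit, Nat.and_one_is_mod, Nat.one_and_eq_mod_two]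

theorem closedB_eq (R : List String) (F : List (List (List String)))
    (s : List String) (hs : ∀ a ∈ s, a ∈ pvNames R F) :
    PySem.List.sorted
      (s ++ (pvNames R F).filter (fun a =>
        (((pvClose (pvFds (pvNames R F) F) (pvMask (pvNames R F) s)) >>> ((pvNames R F).idxOf a)) &&& 1 == 1)
          && !(s.contains a)))
      (fun x => x) false
    = pvClosure R F s := by
  rcases pvClosLoop_spec F s with ⟨L, hL, hnd, hdisj⟩
  have hperm : (s ++ (pvNames R F).filter (fun a =>
      (((pvClose (pvFds (pvNames R F) F) (pvMask (pvNames R F) s)) >>> ((pvNames R F).idxOf a)) &&& 1 == 1)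
        && !(s.contains a))).Perm (pvClosLoop F s) := by
    rw [hL]
    apply List.Perm.append_left
    apply (List.perm_ext_iff_of_nodup (List.Nodup.filter _ (nodup_pvNames R F)) hnd).mpr
    intro x
    simp only [List.mem_filter, Bool.and_eq_true, bit_eq_testBit, Bool.not_eq_eq_eq_not,
      Bool.not_true, List.contains_eq_mem, decide_eq_false_iff_not]
    constructor
    · rintro ⟨hxn, hxb, hxs⟩
      have hcl : x ∈ pvClosLoop F s := (closure_bridge R F s hs x).mpr ⟨hxn, hxb⟩
      rw [hL] at hcl
      rcases List.mem_append.mp hcl with h | h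
      · exact absurd h hxs
      · exact h
    · intro hxL
      have hcl : x ∈ pvClosLoop F s := by
        rw [hL]; exact List.mem_append_right _ hxL
      have hb := (closure_bridge R F s hs x).mp hcl
      exact ⟨hb.1, hb.2, hdisj x hxL⟩
  have hsorted := PySem.List.sorted_eq_sorted_of_perm _ _ (fun (x : String) => x)
    (fun _ _ h => h) hperm
  rw [hsorted]
  unfold pvClosure
  by_cases hlen : 1 < (pvClosLoop F s).length
  · simp only [hlen, if_pos]
  · simp only [hlen, if_false]
    have hshort : pvClosLoop F s = [] ∨ ∃ x, pvClosLoop F s = [x] := by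
      cases hE : pvClosLoop F s with
      | nil => exact Or.inl rfl
      | cons x t =>
        cases t with
        | nil => exact Or.inr ⟨x, rfl⟩
        | cons y u => rw [hE] at hlen; simp at hlen
    rcases hshort with hE | ⟨x, hE⟩ <;> rw [hE]
    · exact PySem.List.sorted_eq_self_of_pairwise _ _ List.Pairwise.nil
    · exact PySem.List.sorted_eq_self_of_pairwise _ _ (List.pairwise_singleton _ _)

-- ===== subset enumeration: A's bitcount loop = B's recursive powerset =====

def pvBits : List String → Nat → List String
  | [], _ => []
  | x :: t, m => (if m % 2 = 1 then [x] else []) ++ pvBits t (m / 2)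

theorem filterform_eq_pvBits (X : List String) :
    ∀ (m : Nat),
      ((List.range X.length).filter (fun j => ((m >>> j) % 2 == 1))).map (fun j => X.getD j "")
        = pvBits X m := by
  induction X with
  | nil => intro m; simp [pvBits]
  | cons x t ih =>
    intro m
    rw [List.length_cons, List.range_succ_eq_map, List.filter_cons, List.filter_map]
    have hps : (fun j => ((m >>> j) % 2 == 1)) ∘ Nat.succ = fun j => (((m / 2) >>> j) % 2 == 1) := by
      funext j
      simp [Function.comp, Nat.shiftRight_succ_inside]
    rw [hps]
    by_cases h0 : m % 2 = 1
    · have hc : ((m >>> 0) % 2 == 1) = true := by simp [h0]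
      rw [if_pos hc]
      rw [List.map_cons, List.map_map]
      have hcomp : (fun j => (x :: t).getD j "") ∘ Nat.succ = fun j => t.getD j "" := by
        funext j; simp
      rw [hcomp, ih (m / 2)]
      simp [pvBits, h0]
    · have hc : ¬ (((m >>> 0) % 2 == 1) = true) := by simpa using h0
      rw [if_neg hc]
      rw [List.map_map]
      have hcomp : (fun j => (x :: t).getD j "") ∘ Nat.succ = fun j => t.getD j "" := by
        funext j; simp
      rw [hcomp, ih (m / 2)]
      simp [pvBits, h0]

theorem pvSubsetOf_natCast (X : List String) (m : Nat) :
    pvSubsetOf X (m : Int) = pvBits X m := by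
  unfold pvSubsetOf
  rw [PySem.List.pyRange_zero_natCast, List.foldl_map]
  refine Eq.trans (PySem.List.foldl_congr_mem (List.range X.length) _
    (fun acc j => if ((m >>> j) % 2 == 1) then acc ++ [X.getD j ""] else acc) [] ?_) ?_
  · intro acc j _
    simp only [Int.toNat_natCast]
    have hsr : ((m : Int) >>> ((j : Int))) = ((m >>> j : Nat) : Int) := Int.shiftRight_natCast m j
    have h2 : PySem.Int.mod ((m >>> j : Nat) : Int) 2 = (((m >>> j) % 2 : Nat) : Int) := by
      exact_mod_cast PySem.Int.mod_natCast (m >>> j) 2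
    have h3 : ((((m >>> j) % 2 : Nat) : Int) == (1 : Int)) = (((m >>> j) % 2) == 1) := by
      rw [Bool.eq_iff_iff, beq_iff_eq, beq_iff_eq]; omega
    simp only [hsr, h2, h3, PySem.List.pyGetD_natCast]
  · rw [PySem.List.foldl_append_if, List.nil_append]
    exact filterform_eq_pvBits X m

theorem pvRange_two_mul : ∀ (k : Nat),
    List.range (2 * k) = (List.range k).flatMap (fun m => [2 * m, 2 * m + 1]) := by
  intro k
  induction k with
  | zero => simp
  | succ n ih =>
    have h : 2 * (n + 1) = (2 * n + 1) + 1 := by ring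
    rw [h, List.range_succ, List.range_succ, ih, List.range_succ, List.flatMap_append]
    simp

theorem map_pvBits_range : ∀ (X : List String),
    (List.range (2 ^ X.length)).map (pvBits X) = pvPowerset X := by
  intro X
  induction X with
  | nil => simp [pvPowerset, pvBits]
  | cons x t ih =>
    have h2 : 2 ^ (x :: t).length = 2 * 2 ^ t.length := by
      rw [List.length_cons, pow_succ]; ring
    rw [h2, pvRange_two_mul, List.map_flatMap]
    have hb : (fun m => ([2 * m, 2 * m + 1].map (pvBits (x :: t))))
        = fun m => [pvBits t m, x :: pvBits t m] := by
      funext m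
      have e1 : pvBits (x :: t) (2 * m) = pvBits t m := by
        simp only [pvBits]
        rw [show (2 * m) % 2 = 0 by omega, show (2 * m) / 2 = m by omega]
        simp
      have e2 : pvBits (x :: t) (2 * m + 1) = x :: pvBits t m := by
        simp only [pvBits]
        rw [show (2 * m + 1) % 2 = 1 by omega, show (2 * m + 1) / 2 = m by omega]
        simp
      simp [e1, e2]
    rw [hb]
    have hR : pvPowerset (x :: t)
        = (List.range (2 ^ t.length)).flatMap (fun m => [pvBits t m, x :: pvBits t m]) := by
      show (pvPowerset t).foldl (fun out s => out ++ [s, x :: s]) [] = _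
      rw [PySem.List.foldl_append_eq_flatMap, List.nil_append, ← ih, List.flatMap_map]
    rw [hR]

theorem pvAllSubsets_eq (R : List String) : pvAllSubsets R = pvSubsetsB R := by
  unfold pvAllSubsets pvSubsetsB
  show PySem.List.sorted
      ((PySem.List.pyRange 0 (2 ^ R.length) 1).foldl
        (fun acc i => if (pvSubsetOf R i).length ≠ 0 then acc ++ [pvSubsetOf R i] else acc) [])
      _ false = _
  congr 1
  have hcast : ((2 : Int) ^ R.length) = ((2 ^ R.length : Nat) : Int) := by push_cast; ring
  rw [hcast, PySem.List.pyRange_zero_natCast,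
    PySem.List.foldl_append_ite (p := fun i => (pvSubsetOf R i).length ≠ 0) (f := pvSubsetOf R),
    List.nil_append, List.filter_map, List.map_map]
  rw [← map_pvBits_range R, List.filter_map]
  have hq : ∀ k : Nat,
      ((fun i => decide ((pvSubsetOf R i).length ≠ 0)) ∘ (fun k : Nat => (k : Int))) k
        = ((fun s => !s.isEmpty) ∘ pvBits R) k := by
    intro k
    simp only [Function.comp, pvSubsetOf_natCast]
    cases hE : pvBits R k <;> simp
  rw [List.filter_congr (fun k _ => hq k)]
  apply List.map_congr_left
  intro k _
  simp only [Function.comp, pvSubsetOf_natCast]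

theorem mem_pvPowerset_sub : ∀ (X : List String) (s : List String),
    s ∈ pvPowerset X → ∀ a ∈ s, a ∈ X := by
  intro X
  induction X with
  | nil =>
    intro s hs
    simp only [pvPowerset, List.mem_singleton] at hs
    subst hs; simp
  | cons x t ih =>
    intro s hs a ha
    unfold pvPowerset at hs
    rw [PySem.List.foldl_append_eq_flatMap, List.nil_append, List.mem_flatMap] at hs
    rcases hs with ⟨u, hu, hm⟩
    rcases List.mem_cons.mp hm with hequ | hm2
    · exact List.mem_cons_of_mem _ (ih u hu a (hequ ▸ ha))
    · have hequ2 : s = x :: u := List.mem_singleton.mp hm2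
      rw [hequ2] at ha
      rcases List.mem_cons.mp ha with rfl | ha2
      · exact List.mem_cons_self
      · exact List.mem_cons_of_mem _ (ih u hu a ha2)

theorem mem_subsetsB_sub (R : List String) (s : List String)
    (hs : s ∈ pvSubsetsB R) : ∀ a ∈ s, a ∈ R := by
  unfold pvSubsetsB at hs
  rw [PySem.List.mem_sorted] at hs
  exact mem_pvPowerset_sub R s (List.mem_filter.mp hs).1

-- ===== phase 2: A's candidate-key pruning = B's all-full-closure pruning =====

theorem phase_eq (R : List String) (F : List (List (List String))) :
    ∀ (subs : List (List String)) (ck : List (List String)) (fulls : List Nat)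
      (acc : List (List (List String))),
      (∀ c ∈ ck, ∀ a ∈ c, a ∈ pvNames R F) →
      (∀ s ∈ subs, ∀ a ∈ s, a ∈ pvNames R F) →
      (∀ c ∈ ck, pvMask (pvNames R F) c ∈ fulls) →
      (∀ f ∈ fulls, ∃ c ∈ ck, (pvMask (pvNames R F) c &&& f == pvMask (pvNames R F) c) = true) →
      (subs.foldl
        (fun (st : List (List String) × List (List (List String))) s =>
          if st.1.any (fun c => pvIncludeAttrs s c) then st
          else
            let tc := pvClosure R F s
            let acc := st.2 ++ [[s, tc]]
            if tc.length == R.length then (st.1 ++ [s], acc) else (st.1, acc))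
        (ck, acc)).2
      = ((subs.map (fun s =>
            (pvMask (pvNames R F) s, s,
             PySem.List.sorted
               (s ++ (pvNames R F).filter (fun a =>
                 (((pvClose (pvFds (pvNames R F) F) (pvMask (pvNames R F) s)) >>> ((pvNames R F).idxOf a)) &&& 1 == 1)
                   && !(s.contains a)))
               (fun x => x) false))).foldl
          (fun (st : List Nat × List (List (List String))) r =>
            ((if r.2.2.length == R.length then st.1 ++ [r.1] else st.1),
             (if !(st.1.any (fun f => f &&& r.1 == f)) then st.2 ++ [[r.2.1, r.2.2]] else st.2)))
          (fulls, acc)).2 := by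
  intro subs
  induction subs with
  | nil => intros; rfl
  | cons s rest ih =>
    intro ck fulls acc hckn hsn hinv1 hinv2
    rw [List.map_cons, List.foldl_cons, List.foldl_cons]
    have hsnames : ∀ a ∈ s, a ∈ pvNames R F := hsn s List.mem_cons_self
    have hrest : ∀ u ∈ rest, ∀ a ∈ u, a ∈ pvNames R F :=
      fun u hu => hsn u (List.mem_cons_of_mem _ hu)
    have hclosed := closedB_eq R F s hsnames
    have hskip : (ck.any (fun c => pvIncludeAttrs s c))
        = (fulls.any (fun f => (f &&& pvMask (pvNames R F) s == f))) := by
      rw [Bool.eq_iff_iff, List.any_eq_true, List.any_eq_true]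
      constructor
      · rintro ⟨c, hc, hicl⟩
        refine ⟨pvMask (pvNames R F) c, hinv1 c hc, ?_⟩
        rw [← include_eq_submask (pvNames R F) s c hsnames (hckn c hc)]
        exact hicl
      · rintro ⟨f, hf, hsub⟩
        rcases hinv2 f hf with ⟨c, hc, hcf⟩
        exact ⟨c, hc, by
          rw [include_eq_submask (pvNames R F) s c hsnames (hckn c hc)]
          exact submask_trans hcf hsub⟩
    simp only [hclosed]
    by_cases hsk : (ck.any (fun c => pvIncludeAttrs s c)) = true
    · have hskB : (fulls.any (fun f => (f &&& pvMask (pvNames R F) s == f))) = true := by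
        rw [← hskip]; exact hsk
      rw [if_pos hsk]
      have hnB : ¬ ((!(fulls.any (fun f => (f &&& pvMask (pvNames R F) s == f)))) = true) := by
        rw [hskB]; simp
      rw [if_neg hnB]
      by_cases hfull : ((pvClosure R F s).length == R.length) = true
      · rw [if_pos hfull]
        refine ih ck (fulls ++ [pvMask (pvNames R F) s]) acc hckn hrest
          (fun c hc => List.mem_append_left _ (hinv1 c hc)) ?_
        intro f hf
        rcases List.mem_append.mp hf with hf' | hf'
        · exact hinv2 f hf'
        · rcases List.mem_singleton.mp hf' with rfl
          rcases List.any_eq_true.mp hsk with ⟨c, hc, hicl⟩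
          refine ⟨c, hc, ?_⟩
          rw [← include_eq_submask (pvNames R F) s c hsnames (hckn c hc)]
          exact hicl
      · rw [if_neg hfull]
        exact ih ck fulls acc hckn hrest hinv1 hinv2
    · have hskB : (fulls.any (fun f => (f &&& pvMask (pvNames R F) s == f))) = false := by
        rw [← hskip]
        exact Bool.eq_false_iff.mpr hsk
      rw [if_neg hsk]
      have hpB : ((!(fulls.any (fun f => (f &&& pvMask (pvNames R F) s == f)))) = true) := by
        rw [hskB]; rfl
      rw [if_pos hpB]
      by_cases hfull : ((pvClosure R F s).length == R.length) = true
      · rw [if_pos hfull, if_pos hfull]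
        refine ih (ck ++ [s]) (fulls ++ [pvMask (pvNames R F) s])
          (acc ++ [[s, pvClosure R F s]]) ?_ hrest ?_ ?_
        · intro c hc
          rcases List.mem_append.mp hc with h | h
          · exact hckn c h
          · rcases List.mem_singleton.mp h with rfl
            exact hsnames
        · intro c hc
          rcases List.mem_append.mp hc with h | h
          · exact List.mem_append_left _ (hinv1 c h)
          · rcases List.mem_singleton.mp h with rfl
            exact List.mem_append_right _ List.mem_cons_self
        · intro f hf
          rcases List.mem_append.mp hf with h | h
          · rcases hinv2 f h with ⟨c, hc, hcf⟩
            exact ⟨c, List.mem_append_left _ hc, hcf⟩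
          · rcases List.mem_singleton.mp h with rfl
            refine ⟨s, List.mem_append_right _ List.mem_cons_self, ?_⟩
            rw [Nat.and_self]
            exact beq_self_eq_true _
      · rw [if_neg hfull, if_neg hfull]
        exact ih ck fulls (acc ++ [[s, pvClosure R F s]]) hckn hrest hinv1 hinv2

theorem ports_eq (R : List String) (F : List (List (List String))) :
    all_closures R F = all_closures_alt R F := by
  unfold all_closures all_closures_alt
  show ((pvAllSubsets R).foldl _ ([], [])).2
      = (((pvSubsetsB R).foldl
          (fun rows s =>
            rows ++ [(pvMask (pvNames R F) s, s,
              PySem.List.sorted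
                (s ++ (pvNames R F).filter (fun a =>
                  (((pvClose (pvFds (pvNames R F) F) (pvMask (pvNames R F) s)) >>> ((pvNames R F).idxOf a)) &&& 1 == 1)
                    && !(s.contains a)))
                (fun x => x) false)]) []).foldl _ ([], [])).2
  rw [PySem.List.foldl_append_singleton_eq_map, List.nil_append, ← pvAllSubsets_eq]
  exact phase_eq R F (pvAllSubsets R) [] [] []
    (by intro c hc; cases hc)
    (by
      intro s hs a ha
      rw [pvAllSubsets_eq] at hs
      exact (mem_pvNames R F a).mpr (Or.inl (mem_subsetsB_sub R s hs a ha)))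
    (by intro c hc; cases hc)
    (by intro f hf; cases hf)

-- ===== VERDICT (by name: the statement is the Claim_ definition above) =====
theorem all_closures_spec : Claim_equal_all_closures := by
  intro R F _ _
  unfold Spec_all_closures
  exact ports_eq R F
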